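-- pv_equiv track=rewrite | github.com/CapaCiTi-Projects/py_dna-modifier | codon.py | check_codon_validity
-- ===== SOURCE A (Python) =====
-- ERRORS = {
--     "WRONG_LEN": "[ERROR]: The codon sequence contains incomplete codon's.",
--     "WRONG_CHARS": "[ERROR]: The codon sequence contains unknown codon's."
--     "Maybe you used Urasil ('U') instead of Thymine ('T'). Urasil is used for RNA, not DNA.",
--     "UNKNOWN_CODON": "[ERROR]: The supplied codon sequence contains unknown codon's."
-- }
--
-- def check_codon_validity(codon):
--     error = ''
--
--     if (len(codon) % 3) != 0:
--         error = ERRORS['WRONG_LEN']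
--     else:
--         for i in codon[:]:
--             if i.upper() not in ['A', 'T', 'G', 'C']:
--                 error = ERRORS['WRONG_CHARS']
--                 break
--
--     return error
-- ===== SOURCE B (Python) =====
-- ERRORS = {
--     "WRONG_LEN": "[ERROR]: The codon sequence contains incomplete codon's.",
--     "WRONG_CHARS": "[ERROR]: The codon sequence contains unknown codon's."
--     "Maybe you used Urasil ('U') instead of Thymine ('T'). Urasil is used for RNA, not DNA.",
--     "UNKNOWN_CODON": "[ERROR]: The supplied codon sequence contains unknown codon's."
-- }
--
-- def check_codon_validity(codon):
--     if len(codon) % 3 != 0: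
--         return ERRORS['WRONG_LEN']
--     # frequency check: loop over the fixed 8-symbol alphabet, not over the
--     # sequence; the sequence is valid iff the occurrence counts of the valid
--     # symbols account for its whole length
--     if sum(codon.count(ch) for ch in 'ATGCatgc') == len(codon):
--         return ''
--     return ERRORS['WRONG_CHARS']
-- ===== Notes on version B (the rewrite author's own statement) =====
-- stated objective: alternative
-- what changed: Replaces A's per-character membership scan with early break by a frequency check that iterates over the fixed 8-letter alphabet and sums codon.count(ch), declaring the sequence valid iff those counts add up to its length.
import Mathlib
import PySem

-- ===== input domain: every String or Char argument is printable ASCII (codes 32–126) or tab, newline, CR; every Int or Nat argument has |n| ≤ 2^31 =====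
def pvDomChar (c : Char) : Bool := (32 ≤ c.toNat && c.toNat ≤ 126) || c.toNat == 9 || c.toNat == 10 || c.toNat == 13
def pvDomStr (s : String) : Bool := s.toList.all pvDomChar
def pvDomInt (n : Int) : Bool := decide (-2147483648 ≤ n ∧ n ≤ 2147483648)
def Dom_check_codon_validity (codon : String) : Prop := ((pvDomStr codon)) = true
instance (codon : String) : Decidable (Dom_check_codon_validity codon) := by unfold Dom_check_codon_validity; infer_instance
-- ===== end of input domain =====

-- B replaces A's per-character membership scan (early break) by a frequency check over the
-- fixed 8-letter alphabet: same cost, different traversal (alternative).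

def pvWrongLen : String := "[ERROR]: The codon sequence contains incomplete codon's."
def pvWrongChars : String := "[ERROR]: The codon sequence contains unknown codon's.Maybe you used Urasil ('U') instead of Thymine ('T'). Urasil is used for RNA, not DNA."

-- ===== PORT A =====
-- the for-loop with break: first char whose .upper() is outside ['A','T','G','C'] sets the error
def pvALoop : List Char → String
| [] => ""
| c :: rest =>
    if ¬ (PySem.Chars.upperChar c ∈ ['A', 'T', 'G', 'C']) then pvWrongChars
    else pvALoop rest

def check_codon_validity (codon : String) : String :=
  if codon.toList.length % 3 ≠ 0 then pvWrongLen
  else pvALoop codon.toList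

-- ===== PORT B =====
-- sum(codon.count(ch) for ch in 'ATGCatgc') == len(codon)
def check_codon_validity_alt (codon : String) : String :=
  if codon.toList.length % 3 ≠ 0 then pvWrongLen
  else if ("ATGCatgc".toList.map (fun ch => PySem.Str.count codon (String.ofList [ch]))).sum
            = codon.toList.length then ""
  else pvWrongChars

-- ===== PRECONDITION & SPEC =====
def Spec_check_codon_validity (codon : String) (out : String) : Prop := out = check_codon_validity_alt codon
instance (codon : String) (out : String) : Decidable (Spec_check_codon_validity codon out) := by unfold Spec_check_codon_validity; infer_instance

-- ===== CLAIM (what is proved, stated in full; the proofs are below) =====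
def Claim_equal_check_codon_validity : Prop := ∀ (codon : String), Dom_check_codon_validity codon → Spec_check_codon_validity codon (check_codon_validity codon)

-- ===== LEMMAS AND PROOFS =====
theorem char_toNat_inj {a b : Char} : a = b ↔ a.toNat = b.toNat := by
  constructor
  · intro h; rw [h]
  · intro h; apply Char.ext; exact UInt32.ext_iff.mpr h

-- ASCII fact: upperChar c lands in ATGC exactly for the 8 valid symbols
theorem pvUpperMem (c : Char) : (PySem.Chars.upperChar c ∈ (['A','T','G','C']:List Char)) ↔ c ∈ "ATGCatgc".toList := by
  have halpha : "ATGCatgc".toList = (['A','T','G','C','a','t','g','c']:List Char) := by decide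
  rw [halpha]
  simp only [PySem.Chars.upperChar, PySem.Chars.islower, List.mem_cons, List.not_mem_nil, or_false,
    Bool.and_eq_true, decide_eq_true_eq, Char.le_def, UInt32.le_iff_toNat_le]
  have hcv : c.val.toNat = c.toNat := rfl
  have hA : ('a':Char).val.toNat = 97 := rfl
  have hZ : ('z':Char).val.toNat = 122 := rfl
  split_ifs with h
  · rw [hA, hZ, hcv] at h
    obtain ⟨h1, h2⟩ := h
    have hlt : c.toNat - 32 < 55296 := by omega
    have ht : (Char.ofNat (c.toNat - 32)).toNat = c.toNat - 32 := by
      simp [Char.ofNat, Char.ofNatAux, Nat.isValidChar, hlt]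
    simp only [char_toNat_inj, ht]
    show c.toNat - 32 = 65 ∨ c.toNat - 32 = 84 ∨ c.toNat - 32 = 71 ∨ c.toNat - 32 = 67 ↔
      c.toNat = 65 ∨ c.toNat = 84 ∨ c.toNat = 71 ∨ c.toNat = 67 ∨ c.toNat = 97 ∨ c.toNat = 116 ∨ c.toNat = 103 ∨ c.toNat = 99
    omega
  · rw [hA, hZ, hcv] at h
    have h' : ¬ (97 ≤ c.toNat ∧ c.toNat ≤ 122) := h
    simp only [char_toNat_inj]
    show c.toNat = 65 ∨ c.toNat = 84 ∨ c.toNat = 71 ∨ c.toNat = 67 ↔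
      c.toNat = 65 ∨ c.toNat = 84 ∨ c.toNat = 71 ∨ c.toNat = 67 ∨ c.toNat = 97 ∨ c.toNat = 116 ∨ c.toNat = 103 ∨ c.toNat = 99
    omega

-- PySem.Chars.count with a single-char needle is List.count
theorem pvCountGoSingleton (c : Char) : ∀ (cs : List Char) (fuel acc : Nat), cs.length ≤ fuel →
    PySem.Chars.count.go [c] fuel cs acc = acc + cs.count c := by
  intro cs
  induction cs with
  | nil => intro fuel acc h; cases fuel <;> simp [PySem.Chars.count.go]
  | cons x t ih =>
    intro fuel acc h
    cases fuel with
    | zero => simp at h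
    | succ n =>
      rw [PySem.Chars.count.go]
      have hp : ([c].isPrefixOf (x :: t)) = (x == c) := by
        simp [List.isPrefixOf, BEq.comm]
      rw [hp]
      simp only [List.length_cons] at h
      by_cases hx : x = c
      · subst hx
        rw [if_pos (by simp)]
        rw [show List.drop ([x]:List Char).length (x :: t) = t from by simp,
          ih n (acc+1) (by omega), List.count_cons]
        simp; omega
      · rw [if_neg (by simp [hx])]
        rw [ih n acc (by omega), List.count_cons]
        simp [hx]

theorem pvCountSingleton (cs : List Char) (c : Char) : PySem.Chars.count cs [c] = cs.count c := by
  rw [PySem.Chars.count]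
  simp [pvCountGoSingleton c cs cs.length 0 le_rfl]

-- summing the per-letter counts over the alphabet counts exactly the valid characters
theorem pvSumCounts (cs : List Char) :
    ((['A','T','G','C','a','t','g','c']:List Char).map (fun ch => cs.count ch)).sum
      = cs.countP (fun c => decide (c ∈ (['A','T','G','C','a','t','g','c']:List Char))) := by
  induction cs with
  | nil => decide
  | cons x t ih =>
    simp only [List.count_cons, List.countP_cons, List.map_cons, List.map_nil,
      List.sum_cons, List.sum_nil, decide_eq_true_eq, List.mem_cons, List.not_mem_nil, or_false] at *
    rw [← ih]
    by_cases h1 : x = 'A' <;> by_cases h2 : x = 'T' <;> by_cases h3 : x = 'G' <;>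
      by_cases h4 : x = 'C' <;> by_cases h5 : x = 'a' <;> by_cases h6 : x = 't' <;>
      by_cases h7 : x = 'g' <;> by_cases h8 : x = 'c' <;>
      simp_all <;> omega

-- A's loop returns '' exactly when every character is valid
theorem pvALoop_eq (l : List Char) :
    pvALoop l = if l.all (fun c => decide (c ∈ "ATGCatgc".toList)) then "" else pvWrongChars := by
  induction l with
  | nil => simp [pvALoop]
  | cons c rest ih =>
    simp only [pvALoop, List.all_cons]
    by_cases hc : PySem.Chars.upperChar c ∈ (['A','T','G','C']:List Char)
    · have hm : c ∈ "ATGCatgc".toList := (pvUpperMem c).mp hc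
      rw [if_neg (not_not.mpr hc), ih]
      simp only [show decide (c ∈ "ATGCatgc".toList) = true from by simpa using hm, Bool.true_and]
    · have hm : c ∉ "ATGCatgc".toList := fun m => hc ((pvUpperMem c).mpr m)
      rw [if_pos hc]
      simp only [show decide (c ∈ "ATGCatgc".toList) = false from by simpa using hm, Bool.false_and]
      rw [if_neg (by simp)]

-- ===== VERDICT (by name: the statement is the Claim_ definition above) =====
theorem check_codon_validity_spec : Claim_equal_check_codon_validity := by
  intro codon _
  unfold Spec_check_codon_validity check_codon_validity check_codon_validity_alt
  split
  · rfl
  · rw [pvALoop_eq]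
    have halpha : "ATGCatgc".toList = (['A','T','G','C','a','t','g','c']:List Char) := by decide
    have hsum : ("ATGCatgc".toList.map (fun ch => PySem.Str.count codon (String.ofList [ch]))).sum
        = codon.toList.countP (fun c => decide (c ∈ "ATGCatgc".toList)) := by
      have : ∀ ch : Char, PySem.Str.count codon (String.ofList [ch]) = codon.toList.count ch := by
        intro ch
        show PySem.Chars.count codon.toList (String.ofList [ch]).toList = _
        rw [show (String.ofList [ch]).toList = [ch] from by simp, pvCountSingleton]
      simp only [this, halpha]
      exact pvSumCounts codon.toList
    rw [hsum]
    by_cases hall : codon.toList.all (fun c => decide (c ∈ "ATGCatgc".toList))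
    · rw [if_pos hall, if_pos]
      exact List.countP_eq_length.mpr (by simpa [List.all_eq_true] using hall)
    · rw [if_neg hall, if_neg]
      intro hlen
      exact hall (by simpa [List.all_eq_true] using List.countP_eq_length.mp hlen)
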